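-- pv_equiv track=rewrite | github.com/olisheldon/aoc25 | python/day6.py | part1
-- ===== SOURCE A (Python) =====
-- def accumulate(col: list[int], op: str) -> int:
--     col_tot = 1 if op == "*" else 0
--     for num in col:
--         if op == "*":
--             col_tot *= num
--         else:
--             col_tot += num
--     return col_tot
--
-- def part1(data: list[str]) -> int:
--     *numbers, operations = data
--     numbers = [list(map(int, row.split())) for row in numbers]
--     operations = operations.split()
--     res = 0
--     for col, op in zip(zip(*numbers), operations):
--         res += accumulate(col, op)
--     return res
-- ===== SOURCE B (Python) =====
-- def part1(data: list[str]) -> int: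
--     *numbers, operations = data
--     rows = [[int(t) for t in r.split()] for r in numbers]
--     ops = operations.split()
--     ncols = 0 if not rows else min(min(len(r) for r in rows), len(ops))
--     totals = [1 if op == "*" else 0 for op in ops[:ncols]]
--     for row in rows:
--         totals = [t * x if op == "*" else t + x
--                   for t, x, op in zip(totals, row, ops)]
--     return sum(totals)
-- ===== Notes on version B (the rewrite author's own statement) =====
-- stated objective: alternative
-- what changed: B never transposes: it keeps one running total per column (seeded 1 for '*', 0 for '+') and streams over the numeric rows once, updating every column total in place, instead of materialising zip(*numbers) columns and reducing each with a per-column accumulate helper.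
import Mathlib
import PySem

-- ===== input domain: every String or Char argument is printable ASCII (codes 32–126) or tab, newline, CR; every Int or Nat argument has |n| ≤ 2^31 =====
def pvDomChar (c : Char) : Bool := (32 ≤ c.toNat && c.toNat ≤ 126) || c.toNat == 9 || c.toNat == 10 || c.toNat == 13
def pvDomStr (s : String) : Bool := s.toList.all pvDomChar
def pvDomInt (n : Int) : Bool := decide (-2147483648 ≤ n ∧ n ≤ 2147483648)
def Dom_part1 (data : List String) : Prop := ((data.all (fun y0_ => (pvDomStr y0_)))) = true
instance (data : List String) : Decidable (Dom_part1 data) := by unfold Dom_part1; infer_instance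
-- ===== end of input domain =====

-- B streams over the rows keeping one running total per column instead of transposing; alternative decomposition, same cost.

-- ===== PORT A =====
def accumulate (col : List Int) (op : String) : Int :=
  col.foldl (fun t num => if op == "*" then t * num else t + num)
    (if op == "*" then 1 else 0)

def part1 (data : List String) : Int :=
  let numbers := data.dropLast
  let operations := (data.getLast?).getD ""
  let rows := numbers.map (fun r => (PySem.Str.split₀ r).map (fun t => (PySem.Int.ofStr? t).getD 0))
  let ops := PySem.Str.split₀ operations
  -- zip(*rows): [] when rows = [], else the columns up to the shortest row length
  let cols : List (List Int) :=
    match rows with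
    | [] => []
    | _ => (List.range (((rows.map List.length).foldr min (rows.headD []).length))).map
        (fun j => rows.map (fun r => r.getD j 0))
  (cols.zip ops).foldl (fun res p => res + accumulate p.1 p.2) 0

-- ===== PORT B =====
def zipWith3Col (f : Int → Int → String → Int) : List Int → List Int → List String → List Int
  | t :: ts, x :: xs, o :: os => f t x o :: zipWith3Col f ts xs os
  | _, _, _ => []

def part1_alt (data : List String) : Int :=
  let numbers := data.dropLast
  let rows := numbers.map (fun r => (PySem.Str.split₀ r).map (fun t => (PySem.Int.ofStr? t).getD 0))
  let ops := PySem.Str.split₀ ((data.getLast?).getD "")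
  let ncols := if rows.isEmpty then 0 else
    min ((rows.map List.length).foldr min (rows.headD []).length) ops.length
  let totals0 := (ops.take ncols).map (fun op => if op == "*" then (1 : Int) else 0)
  let totals := rows.foldl (fun ts row =>
      zipWith3Col (fun t x op => if op == "*" then t * x else t + x) ts row ops) totals0
  totals.sum

-- ===== PRECONDITION & SPEC =====
-- Pre_ excludes exactly the inputs where Python A raises: the empty list (unpacking fails with
-- ValueError) and inputs where some numeric-row token is not int()-parsable (ValueError).
def Pre_part1 (data : List String) : Prop :=
  data ≠ [] ∧ ∀ r ∈ data.dropLast, ∀ t ∈ PySem.Str.split₀ r, (PySem.Int.ofStr? t).isSome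
instance (data : List String) : Decidable (Pre_part1 data) := by unfold Pre_part1; infer_instance

def pvWitness_part1 : List String := ["1 2 3", "4 5 6", "* + *"]

def Spec_part1 (data : List String) (out : Int) : Prop := out = part1_alt data
instance (data : List String) (out : Int) : Decidable (Spec_part1 data out) := by unfold Spec_part1; infer_instance

-- ===== CLAIM (what is proved, stated in full; the proofs are below) =====
def Claim_equal_part1 : Prop := ∀ (data : List String), Dom_part1 data → Pre_part1 data → Spec_part1 data (part1 data)

-- ===== LEMMAS AND PROOFS =====

-- f is B's per-cell update
def pvF (t x : Int) (op : String) : Int := if op == "*" then t * x else t + x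

lemma pv_range_map_getD (ts : List Int) :
    (List.range ts.length).map (fun j => ts.getD j 0) = ts := by
  apply List.ext_getElem
  · simp
  · intro j h1 h2
    simp [List.getD_eq_getElem?_getD, h2]

lemma pv_zipWith3Col_eq_map (ops : List String) :
    ∀ (ts row : List Int), ts.length ≤ row.length → ts.length ≤ ops.length →
    zipWith3Col pvF ts row ops
      = (List.range ts.length).map
          (fun j => pvF (ts.getD j 0) (row.getD j 0) (ops.getD j "")) := by
  induction ops with
  | nil =>
    intro ts row h1 h2
    have : ts = [] := List.eq_nil_of_length_eq_zero (Nat.le_zero.mp h2)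
    subst this; cases row <;> simp [zipWith3Col]
  | cons o os ih =>
    intro ts row h1 h2
    cases ts with
    | nil => simp [zipWith3Col]
    | cons t ts' =>
      cases row with
      | nil => simp at h1
      | cons x xs =>
        simp only [zipWith3Col, List.length_cons]
        rw [List.range_succ_eq_map]
        simp only [List.map_cons, List.map_map]
        refine List.cons_eq_cons.mpr ⟨rfl, ?_⟩
        rw [ih ts' xs (by simpa using h1) (by simpa using h2)]
        apply List.map_congr_left
        intro j hj
        simp [Function.comp]

lemma pv_fold_rows (ops : List String) :
    ∀ (rows : List (List Int)) (ts : List Int),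
    (∀ r ∈ rows, ts.length ≤ r.length) → ts.length ≤ ops.length →
    rows.foldl (fun ts row => zipWith3Col pvF ts row ops) ts
      = (List.range ts.length).map
          (fun j => rows.foldl (fun t r => pvF t (r.getD j 0) (ops.getD j "")) (ts.getD j 0)) := by
  intro rows
  induction rows with
  | nil =>
    intro ts _ _
    simp only [List.foldl_nil]
    exact (pv_range_map_getD ts).symm
  | cons row rest ih =>
    intro ts hrows hops
    have hrow : ts.length ≤ row.length := hrows row (by simp)
    have hz := pv_zipWith3Col_eq_map ops ts row hrow hops
    have hzlen : (zipWith3Col pvF ts row ops).length = ts.length := by simp [hz]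
    simp only [List.foldl_cons]
    rw [ih (zipWith3Col pvF ts row ops)
        (fun r hr => hzlen ▸ hrows r (by simp [hr])) (hzlen ▸ hops)]
    rw [hzlen]
    apply List.map_congr_left
    intro j hj
    have hj' : j < ts.length := List.mem_range.mp hj
    congr 1
    rw [hz]
    rw [List.getD_eq_getElem?_getD, List.getElem?_map]
    simp [hj']

lemma pv_foldr_min_le (L : List Nat) (i : Nat) : ∀ x ∈ L, L.foldr min i ≤ x := by
  induction L with
  | nil => simp
  | cons a L ih =>
    intro x hx
    rcases List.mem_cons.mp hx with h | h
    · subst h; exact min_le_left _ _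
    · exact le_trans (min_le_right _ _) (ih x h)

lemma pv_accumulate_eq_foldl (rows : List (List Int)) (j : Nat) (op : String) :
    accumulate (rows.map (fun r => r.getD j 0)) op
      = rows.foldl (fun t r => pvF t (r.getD j 0) op) (if op == "*" then 1 else 0) := by
  unfold accumulate pvF
  rw [List.foldl_map]

lemma pv_getD_eq_getElem {α : Type} (l : List α) (j : Nat) (d : α) (h : j < l.length) :
    l.getD j d = l[j] := by
  simp [List.getD_eq_getElem?_getD, List.getElem?_eq_getElem h]

lemma pv_core2 (rows : List (List Int)) (ops : List String) :
    ((((List.range ((rows.map List.length).foldr min (rows.headD []).length)).map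
          (fun j => rows.map (fun (r : List Int) => r.getD j 0))).zip ops).foldl
        (fun (res : Int) (p : List Int × String) => res + accumulate p.1 p.2) 0)
    = (rows.foldl (fun ts row => zipWith3Col pvF ts row ops)
        ((ops.take (min ((rows.map List.length).foldr min (rows.headD []).length) ops.length)).map
          (fun op => if op == "*" then (1 : Int) else 0))).sum := by
  set m := (rows.map List.length).foldr min (rows.headD []).length with hm
  set n := min m ops.length with hn
  set totals0 := (ops.take n).map (fun op => if op == "*" then (1 : Int) else 0) with ht0
  have hnops : n ≤ ops.length := min_le_right _ _
  have hnm : n ≤ m := min_le_left _ _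
  have ht0len : totals0.length = n := by
    simp [ht0, Nat.min_eq_left hnops]
  have hmle : ∀ r ∈ rows, m ≤ r.length := by
    intro r hr
    exact pv_foldr_min_le _ _ _ (List.mem_map.mpr ⟨r, hr, rfl⟩)
  rw [pv_fold_rows ops rows totals0
    (fun r hr => ht0len ▸ le_trans hnm (hmle r hr)) (ht0len ▸ hnops)]
  rw [PySem.List.foldl_add, zero_add]
  congr 1
  apply List.ext_getElem
  · simp [ht0len, hn]
  · intro j hj1 hj2
    simp only [List.length_map, List.length_range, ht0len] at hj2
    have hjn : j < n := hj2
    have hjm : j < m := lt_of_lt_of_le hjn hnm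
    have hjops : j < ops.length := lt_of_lt_of_le hjn hnops
    simp only [List.getElem_map, List.getElem_zip, List.getElem_range]
    rw [pv_accumulate_eq_foldl]
    have hops : ops.getD j "" = ops[j] := pv_getD_eq_getElem _ _ _ hjops
    have htj : totals0.getD j 0 = (if ops[j] == "*" then (1 : Int) else 0) := by
      rw [pv_getD_eq_getElem _ _ _ (by rw [ht0len]; exact hjn)]
      simp [ht0, List.getElem_take]
    rw [hops, htj]

-- ===== VERDICT (by name: the statement is the Claim_ definition above) =====
theorem part1_spec : Claim_equal_part1 := by
  intro data _ _
  show part1 data = part1_alt data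
  simp only [part1, part1_alt]
  cases hr : data.dropLast.map
      (fun r => (PySem.Str.split₀ r).map (fun t => (PySem.Int.ofStr? t).getD 0)) with
  | nil => simp
  | cons r0 rs =>
    simp only [List.isEmpty_cons, Bool.false_eq_true, if_false]
    exact pv_core2 (r0 :: rs) _
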